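-- pv_equiv track=rewrite | github.com/connorodea/vidmation | src/aividio/services/youtube/metadata.py | _enforce_tag_limits
-- ===== SOURCE A (Python) =====
-- _MAX_TAGS_TOTAL_CHARS = 500
--
-- def _enforce_tag_limits(tags: list[str]) -> list[str]:
--     """Trim the tag list so total characters stay under 500.
--
--     YouTube counts tags as comma-separated, so each tag's length
--     plus separators must fit within the limit.
--     """
--     kept: list[str] = []
--     total_chars = 0
--
--     for tag in tags:
--         tag = tag.strip()
--         if not tag:
--             continue
--         # YouTube counts the tag itself; commas are implicit separators.
--         addition = len(tag) + (2 if kept else 0)  # ", " between tags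
--         if total_chars + addition > _MAX_TAGS_TOTAL_CHARS:
--             break
--         kept.append(tag)
--         total_chars += addition
--
--     return kept
-- ===== SOURCE B (Python) =====
-- _MAX_TAGS_TOTAL_CHARS = 500
--
-- def _enforce_tag_limits(tags):
--     """Trim the tag list so total characters stay under 500 (prefix-sum cutoff)."""
--     clean = [s for t in tags if (s := t.strip())]
--     costs = [len(s) + (2 if i else 0) for i, s in enumerate(clean)]
--     prefix = []
--     total = 0
--     for c in costs:
--         total += c
--         prefix.append(total)
--     cutoff = 0
--     while cutoff < len(prefix) and prefix[cutoff] <= _MAX_TAGS_TOTAL_CHARS: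
--         cutoff += 1
--     return clean[:cutoff]
-- ===== Notes on version B (the rewrite author's own statement) =====
-- stated objective: alternative
-- what changed: Replaces A's stateful loop (running total, conditional break, kept-nonempty separator test) by a clean-filter pass, a prefix-sum cost table, and a cutoff index, returning clean[:cutoff].
import Mathlib
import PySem

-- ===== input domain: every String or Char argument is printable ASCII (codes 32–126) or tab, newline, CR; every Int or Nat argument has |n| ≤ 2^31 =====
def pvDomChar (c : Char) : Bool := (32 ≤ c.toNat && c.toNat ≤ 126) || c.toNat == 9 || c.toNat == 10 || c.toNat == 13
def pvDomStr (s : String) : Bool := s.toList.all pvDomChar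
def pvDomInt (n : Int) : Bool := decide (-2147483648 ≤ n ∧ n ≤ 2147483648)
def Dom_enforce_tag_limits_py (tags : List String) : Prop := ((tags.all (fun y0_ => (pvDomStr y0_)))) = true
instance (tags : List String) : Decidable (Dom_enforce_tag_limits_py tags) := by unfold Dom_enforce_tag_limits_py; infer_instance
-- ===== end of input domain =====

-- B replaces A's stateful break-loop by a clean pass, a prefix-sum cost table and a cutoff index (alternative decomposition, same cost).

-- ===== PORT A =====
-- the for-loop of _enforce_tag_limits, state (kept, total_chars)
def enforce_tag_limits_loop : List String → List String → Int → List String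
  | [], kept, _ => kept
  | t :: rest, kept, total =>
    let tag := PySem.Str.strip t
    if tag = "" then enforce_tag_limits_loop rest kept total
    else
      let addition : Int := PySem.Str.len tag + (if kept.isEmpty then 0 else 2)
      if 500 < total + addition then kept
      else enforce_tag_limits_loop rest (kept ++ [tag]) (total + addition)

def enforce_tag_limits_py (tags : List String) : List String :=
  enforce_tag_limits_loop tags [] 0

-- ===== PORT B =====
-- the `for c in costs` prefix-building loop of Source B, state (total, prefix)
def etl_prefixLoop : List Int → Int → List Int → List Int
  | [], _, acc => acc
  | c :: cs, total, acc => etl_prefixLoop cs (total + c) (acc ++ [total + c])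

-- the `while cutoff < len(prefix) and prefix[cutoff] <= 500` loop of Source B
def etl_cutoffLoop : List Int → Nat
  | [] => 0
  | p :: ps => if p ≤ 500 then etl_cutoffLoop ps + 1 else 0

def enforce_tag_limits_py_alt (tags : List String) : List String :=
  let clean := (tags.map PySem.Str.strip).filter (fun s => s ≠ "")
  let costs := clean.zipIdx.map (fun p => PySem.Str.len p.1 + (if p.2 = 0 then 0 else 2))
  let pfx := etl_prefixLoop costs 0 []
  clean.take (etl_cutoffLoop pfx)

-- ===== PRECONDITION & SPEC =====
def Spec_enforce_tag_limits_py (tags : List String) (out : List String) : Prop := out = enforce_tag_limits_py_alt tags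
instance (tags : List String) (out : List String) : Decidable (Spec_enforce_tag_limits_py tags out) := by unfold Spec_enforce_tag_limits_py; infer_instance

-- ===== CLAIM (what is proved, stated in full; the proofs are below) =====
def Claim_equal_enforce_tag_limits_py : Prop := ∀ (tags : List String), Dom_enforce_tag_limits_py tags → Spec_enforce_tag_limits_py tags (enforce_tag_limits_py tags)

-- ===== LEMMAS AND PROOFS =====

-- common reference function: greedy keep on the cleaned list
def etl_g : List String → Int → Bool → List String
  | [], _, _ => []
  | s :: cs, total, first =>
    let add : Int := PySem.Str.len s + (if first then 0 else 2)
    if 500 < total + add then []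
    else s :: etl_g cs (total + add) false

-- per-position costs of the cleaned list, `first` = position 0
def etl_costsF : Bool → List String → List Int
  | _, [] => []
  | first, s :: cs => (PySem.Str.len s + (if first then 0 else 2)) :: etl_costsF false cs

-- prefix sums starting from `t`
def etl_pf : List Int → Int → List Int
  | [], _ => []
  | c :: cs, t => (t + c) :: etl_pf cs (t + c)

theorem etl_loopA_eq (ts : List String) : ∀ (kept : List String) (total : Int),
    enforce_tag_limits_loop ts kept total =
      kept ++ etl_g ((ts.map PySem.Str.strip).filter (fun s => s ≠ "")) total kept.isEmpty := by
  induction ts with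
  | nil => intro kept total; simp [enforce_tag_limits_loop, etl_g]
  | cons t ts ih =>
    intro kept total
    by_cases h : PySem.Str.strip t = ""
    · simp [enforce_tag_limits_loop, h, ih]
    · by_cases hk : kept = []
      · subst hk
        simp only [enforce_tag_limits_loop, etl_g, List.map_cons, List.filter_cons, h, ne_eq,
          not_false_eq_true, decide_true, if_true, List.isEmpty_nil, List.nil_append, ite_true,
          ite_false]
        split_ifs with hb
        · rfl
        · rw [ih]; simp
      · have hke : kept.isEmpty = false := by simp [hk]
        simp only [enforce_tag_limits_loop, etl_g, List.map_cons, List.filter_cons, h, ne_eq,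
          not_false_eq_true, decide_true, if_true, hke, Bool.false_eq_true, ite_false]
        split_ifs with hb
        · simp
        · rw [ih]
          have hne : (kept ++ [PySem.Str.strip t]).isEmpty = false := by cases kept <;> rfl
          rw [hne]
          simp

theorem etl_prefixLoop_eq (cs : List Int) : ∀ (t : Int) (acc : List Int),
    etl_prefixLoop cs t acc = acc ++ etl_pf cs t := by
  induction cs with
  | nil => intro t acc; simp [etl_prefixLoop, etl_pf]
  | cons c cs ih => intro t acc; simp [etl_prefixLoop, etl_pf, ih]

theorem etl_costs_zipIdx_tail (cs : List String) : ∀ (k : Nat), k ≠ 0 →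
    (cs.zipIdx k).map (fun p => PySem.Str.len p.1 + (if p.2 = 0 then 0 else 2)) = etl_costsF false cs := by
  induction cs with
  | nil => intro k _; simp [etl_costsF]
  | cons s cs ih =>
    intro k hk
    rw [List.zipIdx_cons, List.map_cons, ih (k + 1) (by omega), etl_costsF]
    simp [hk]

theorem etl_costs_zipIdx (cs : List String) :
    cs.zipIdx.map (fun p => PySem.Str.len p.1 + (if p.2 = 0 then 0 else 2)) = etl_costsF true cs := by
  cases cs with
  | nil => simp [etl_costsF]
  | cons s cs =>
    rw [List.zipIdx_cons, List.map_cons, etl_costs_zipIdx_tail cs 1 (by omega), etl_costsF]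
    simp

theorem etl_take_cutoff (cs : List String) : ∀ (total : Int) (first : Bool),
    cs.take (etl_cutoffLoop (etl_pf (etl_costsF first cs) total)) = etl_g cs total first := by
  induction cs with
  | nil => intro total first; simp [etl_costsF, etl_pf, etl_cutoffLoop, etl_g]
  | cons s cs ih =>
    intro total first
    cases first <;>
    · simp only [etl_costsF, etl_pf, etl_cutoffLoop, etl_g, ite_true, ite_false,
        Bool.false_eq_true, add_zero]
      split_ifs with h1 h2 <;>
        first
          | (exfalso; omega)
          | simp [List.take_succ_cons, ih]

-- ===== VERDICT (by name: the statement is the Claim_ definition above) =====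
theorem enforce_tag_limits_py_spec : Claim_equal_enforce_tag_limits_py := by
  intro tags _
  unfold Spec_enforce_tag_limits_py enforce_tag_limits_py
  rw [etl_loopA_eq]
  simp only [enforce_tag_limits_py_alt]
  rw [etl_costs_zipIdx, etl_prefixLoop_eq]
  simp only [List.nil_append, List.isEmpty_nil]
  rw [etl_take_cutoff]
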